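-- pv_equiv track=rewrite | github.com/Hemant-Jain-Author/Problem-Solving-in-Data-Structures-Algorithms-using-Python | AlgorithmsChapters/Greedy/OptimalMergePattern.py | optimal_merge_pattern
-- ===== SOURCE A (Python) =====
-- import heapq
--
-- def optimal_merge_pattern(arr,  size) :
--     hp =  []
--     for i in range(size) :
--         heapq.heappush(hp, arr[i])
--
--     total = 0
--     while (len(hp) > 1) :
--         value = heapq.heappop(hp)
--         value += heapq.heappop(hp)
--         heapq.heappush(hp, value)
--         total += value
--     return  total
-- ===== SOURCE B (Python) =====
-- def optimal_merge_pattern(arr, size):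
--     # Sorted-list priority queue instead of a binary heap: gather the first
--     # `size` items (indexing raises exactly where A's arr[i] does), sort once,
--     # then repeatedly take the two smallest from the front and insert their
--     # sum back at its ordered position by linear scan.
--     pool = sorted(arr[i] for i in range(size))
--     total = 0
--     while len(pool) > 1:
--         s = pool[0] + pool[1]
--         rest = pool[2:]
--         i = 0
--         while i < len(rest) and rest[i] < s:
--             i += 1
--         rest.insert(i, s)
--         pool = rest
--         total += s
--     return total
-- ===== Notes on version B (the rewrite author's own statement) =====
-- stated objective: alternative
-- what changed: Replaces the binary min-heap (heapq sift-up/sift-down) with a sort-once sorted-list priority queue: take the two front elements each round and insert their sum back at its ordered position by linear scan; trades A's O(n log n) for a plainer O(n^2) structure.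
import Mathlib
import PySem

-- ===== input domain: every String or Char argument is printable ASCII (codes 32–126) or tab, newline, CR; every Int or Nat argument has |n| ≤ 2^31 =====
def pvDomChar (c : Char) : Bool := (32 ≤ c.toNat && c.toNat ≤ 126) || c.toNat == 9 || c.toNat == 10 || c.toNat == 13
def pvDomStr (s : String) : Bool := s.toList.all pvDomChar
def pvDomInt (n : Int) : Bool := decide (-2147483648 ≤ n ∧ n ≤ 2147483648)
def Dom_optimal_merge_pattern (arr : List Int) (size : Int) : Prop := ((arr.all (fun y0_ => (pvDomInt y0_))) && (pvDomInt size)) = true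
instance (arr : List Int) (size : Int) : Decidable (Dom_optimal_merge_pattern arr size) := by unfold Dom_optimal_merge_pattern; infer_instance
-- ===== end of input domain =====

-- B replaces heapq's binary min-heap with a sort-once sorted-list priority queue (ordered re-insertion of each merged sum); equality of the returned total is proved for size ≤ len(arr).

-- ===== PORT A =====
-- heapq is not covered by PySem, so its algorithm (CPython's heapq._siftdown /
-- _siftup / heappush / heappop) is ported by hand, step for step; exact for Int
-- elements.  Each while-loop is ported as structural recursion on a fuel
-- argument that is a totality guard only: the fuel is chosen so it never runs
-- out before the loop's own exit condition fires (pos strictly decreases /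
-- endpos - pos strictly decreases / the heap shrinks by one per iteration).
-- pySiftdownFuel carries Python's `newitem` (read once at `pos`) as the
-- explicit argument x; writing x at pos first and re-reading it is the same.

-- Python: the while-loop of _siftdown(heap, startpos, pos) (body: move parent
-- down while newitem < parent, break otherwise), then heap[pos] = newitem
def pySiftdownFuel (fuel : Nat) (m : List Int) (startpos pos : Nat) (x : Int) : List Int :=
  match fuel with
  | 0 => m.set pos x
  | fuel + 1 =>
    if startpos < pos ∧ x < m.getD ((pos - 1) / 2) 0 then
      pySiftdownFuel fuel (m.set pos (m.getD ((pos - 1) / 2) 0)) startpos ((pos - 1) / 2) x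
    else m.set pos x

-- Python: _siftdown(heap, startpos, pos); pos strictly decreases, so fuel := pos suffices
def pySiftdown (m : List Int) (startpos pos : Nat) (x : Int) : List Int :=
  pySiftdownFuel pos m startpos pos x

-- Python: heapq.heappush(heap, item) = heap.append(item); _siftdown(heap, 0, len(heap)-1)
def pyHeappush (hp : List Int) (x : Int) : List Int :=
  pySiftdown (hp ++ [x]) 0 hp.length x

-- Python: childpos selection inside _siftup's loop (rightpos if it exists and not heap[childpos] < heap[rightpos])
def pyChild (m : List Int) (pos endpos : Nat) : Nat :=
  if 2 * pos + 2 < endpos ∧ ¬ m.getD (2 * pos + 1) 0 < m.getD (2 * pos + 2) 0 then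
    2 * pos + 2
  else 2 * pos + 1

-- Python: the while-loop of _siftup followed by its trailing heap[pos] = newitem;
-- _siftdown(heap, startpos, pos) (startpos is always 0 here); endpos - pos strictly
-- decreases, so fuel := endpos suffices
def pySiftupFuel (fuel : Nat) (m : List Int) (pos : Nat) (x : Int) (endpos : Nat) : List Int :=
  match fuel with
  | 0 => pySiftdown m 0 pos x
  | fuel + 1 =>
    if 2 * pos + 1 < endpos then
      pySiftupFuel fuel (m.set pos (m.getD (pyChild m pos endpos) 0)) (pyChild m pos endpos) x endpos
    else pySiftdown m 0 pos x

def pySiftupLoop (m : List Int) (pos : Nat) (x : Int) (endpos : Nat) : List Int :=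
  pySiftupFuel endpos m pos x endpos

-- Python: heapq.heappop(heap); A never pops an empty heap (its loop requires len > 1),
-- so the empty case returns a junk value (Python would raise IndexError there).
def pyHeappop (hp : List Int) : Int × List Int :=
  let lastelt := hp.getLastD 0
  let rest := hp.dropLast
  if rest.isEmpty then (lastelt, rest)
  else (rest.getD 0 0, pySiftupLoop (rest.set 0 lastelt) 0 lastelt rest.length)

-- Python: the while(len(hp) > 1) merge loop of optimal_merge_pattern; each
-- iteration shrinks the heap by one, so fuel := len(hp) suffices
def pyMergeFuel (fuel : Nat) (hp : List Int) : Int :=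
  match fuel with
  | 0 => 0
  | fuel + 1 =>
    if 1 < hp.length then
      ((pyHeappop hp).1 + (pyHeappop (pyHeappop hp).2).1) +
        pyMergeFuel fuel
          (pyHeappush (pyHeappop (pyHeappop hp).2).2
            ((pyHeappop hp).1 + (pyHeappop (pyHeappop hp).2).1))
    else 0

def pyMergeLoop (hp : List Int) : Int :=
  pyMergeFuel hp.length hp

def optimal_merge_pattern (arr : List Int) (size : Int) : Int :=
  -- for i in range(size): heapq.heappush(hp, arr[i]) — arr[i] via pyGetD, in range under Pre_
  let hp := (PySem.List.pyRange 0 size 1).foldl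
      (fun h i => pyHeappush h (PySem.List.pyGetD arr i 0)) []
  pyMergeLoop hp

-- ===== PORT B =====
-- the index-scan + rest.insert(i, s) of Source B as one structural recursion:
-- walk past the elements < s, put s in front of the first element ≥ s
def bInsert (s : Int) (l : List Int) : List Int :=
  match l with
  | [] => [s]
  | b :: t => if b < s then b :: bInsert s t else s :: b :: t

-- the while(len(pool) > 1) loop of Source B; the pool shrinks by one per iteration,
-- so fuel := len(pool) suffices as a totality guard
def bLoopFuel : Nat → List Int → Int
  | 0, _ => 0
  | fuel + 1, a :: b :: rest => (a + b) + bLoopFuel fuel (bInsert (a + b) rest)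
  | _ + 1, _ => 0

def bLoop (pool : List Int) : Int :=
  bLoopFuel pool.length pool

def optimal_merge_pattern_alt (arr : List Int) (size : Int) : Int :=
  -- sorted(arr[i] for i in range(size)) — arr[i] via pyGetD, in range under Pre_
  bLoop (PySem.List.sorted
    ((PySem.List.pyRange 0 size 1).map (fun i => PySem.List.pyGetD arr i 0))
    (fun x => x) false)

-- ===== PRECONDITION & SPEC =====
-- Pre_ excludes exactly the inputs where both Pythons raise: arr[i] raises
-- IndexError as soon as size exceeds len(arr).
def Pre_optimal_merge_pattern (arr : List Int) (size : Int) : Prop := size ≤ (arr.length : Int)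
instance (arr : List Int) (size : Int) : Decidable (Pre_optimal_merge_pattern arr size) := by
  unfold Pre_optimal_merge_pattern; infer_instance

def pvWitness_optimal_merge_pattern : List Int × Int := ([5, 1, 3, 2], 4)

def Spec_optimal_merge_pattern (arr : List Int) (size : Int) (out : Int) : Prop :=
  out = optimal_merge_pattern_alt arr size
instance (arr : List Int) (size : Int) (out : Int) : Decidable (Spec_optimal_merge_pattern arr size out) := by
  unfold Spec_optimal_merge_pattern; infer_instance

-- ===== CLAIM (what is proved, stated in full; the proofs are below) =====
def Claim_equal_optimal_merge_pattern : Prop := ∀ (arr : List Int) (size : Int), Dom_optimal_merge_pattern arr size → Pre_optimal_merge_pattern arr size → Spec_optimal_merge_pattern arr size (optimal_merge_pattern arr size)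

-- ===== LEMMAS AND PROOFS =====

def IsHeap (m : List Int) : Prop :=
  ∀ j : Nat, 0 < j → j < m.length → m.getD ((j - 1) / 2) 0 ≤ m.getD j 0

theorem getD_set' (m : List Int) (i j : Nat) (v : Int) (hi : i < m.length) :
    (m.set i v).getD j 0 = if j = i then v else m.getD j 0 := by
  simp only [List.getD_eq_getElem?_getD, List.getElem?_set]
  split
  · next h => subst h; simp
  · next h => simp [Ne.symm h]

theorem getD_cons_set_perm (t : List Int) (k : Nat) (x : Int) (hk : k < t.length) :
    (t.getD k 0 :: t.set k x).Perm (x :: t) := by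
  induction t generalizing k with
  | nil => simp at hk
  | cons b u ih =>
    cases k with
    | zero => simpa using List.Perm.swap x b u
    | succ k =>
      simp only [List.getD_cons_succ, List.set_cons_succ]
      exact ((List.Perm.swap b _ _).trans ((ih k (by simpa using hk)).cons b)).trans
        (List.Perm.swap x b u)

theorem set_set_perm (m : List Int) (i j : Nat) (x : Int)
    (hi : i < m.length) (hj : j < m.length) (hne : i ≠ j) :
    ((m.set i (m.getD j 0)).set j x).Perm (m.set i x) := by
  induction m generalizing i j with
  | nil => simp at hi
  | cons a t ih =>
    cases i with
    | zero =>
      cases j with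
      | zero => exact absurd rfl hne
      | succ j =>
        simp only [List.getD_cons_succ, List.set_cons_zero, List.set_cons_succ]
        exact getD_cons_set_perm t j x (by simpa using hj)
    | succ i =>
      cases j with
      | zero =>
        simp only [List.getD_cons_zero, List.set_cons_succ, List.set_cons_zero]
        have h1 := getD_cons_set_perm (t.set i a) i x (by simpa using hi)
        have h2 : (t.set i a).getD i 0 = a := by
          rw [getD_set' t i i a (by simpa using hi)]; simp
        rw [h2, List.set_set] at h1
        exact h1.symm
      | succ j =>
        simp only [List.getD_cons_succ, List.set_cons_succ]
        exact (ih i j (by simpa using hi) (by simpa using hj) (by omega)).cons a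

theorem siftdownF_length (fuel : Nat) : ∀ (m : List Int) (s p : Nat) (x : Int),
    (pySiftdownFuel fuel m s p x).length = m.length := by
  induction fuel with
  | zero => intro m s p x; simp [pySiftdownFuel]
  | succ fuel ih =>
    intro m s p x
    rw [pySiftdownFuel]
    split
    · rw [ih]; simp
    · simp

theorem siftupF_length (fuel : Nat) : ∀ (m : List Int) (p : Nat) (x : Int) (e : Nat),
    (pySiftupFuel fuel m p x e).length = m.length := by
  induction fuel with
  | zero => intro m p x e; simp [pySiftupFuel, pySiftdown, siftdownF_length]
  | succ fuel ih =>
    intro m p x e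
    rw [pySiftupFuel]
    split
    · rw [ih]; simp
    · simp [pySiftdown, siftdownF_length]

theorem length_pyHeappush (hp : List Int) (x : Int) :
    (pyHeappush hp x).length = hp.length + 1 := by
  simp [pyHeappush, pySiftdown, siftdownF_length]

theorem length_pyHeappop_snd (hp : List Int) :
    (pyHeappop hp).2.length = hp.length - 1 := by
  unfold pyHeappop
  by_cases h : hp.dropLast.isEmpty
  · have h2 := congrArg List.length (List.isEmpty_iff.mp h)
    simp only [List.length_dropLast, List.length_nil] at h2
    simp [h, h2]
  · simp [h, pySiftupLoop, siftupF_length, List.length_dropLast]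

theorem siftdownF_perm (fuel : Nat) : ∀ (m : List Int) (s p : Nat) (x : Int),
    p ≤ fuel → p < m.length → (pySiftdownFuel fuel m s p x).Perm (m.set p x) := by
  induction fuel with
  | zero => intro m s p x _ _; rw [pySiftdownFuel]
  | succ fuel ih =>
    intro m s p x hf hp
    rw [pySiftdownFuel]
    split
    · next hc =>
      have hpp : (p - 1) / 2 < m.length := by omega
      refine (ih _ s _ x (by omega) (by simpa using hpp)).trans ?_
      exact set_set_perm m p ((p - 1) / 2) x hp hpp (by omega)
    · exact List.Perm.refl _

theorem siftdownF_heap (fuel : Nat) : ∀ (m : List Int) (p : Nat) (x : Int),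
    p ≤ fuel → p < m.length →
    (∀ j : Nat, 0 < j → j < m.length → (j - 1) / 2 ≠ p → j ≠ p →
      m.getD ((j - 1) / 2) 0 ≤ m.getD j 0) →
    (0 < p → ∀ j : Nat, 0 < j → j < m.length → (j - 1) / 2 = p →
      m.getD ((p - 1) / 2) 0 ≤ m.getD j 0) →
    (∀ j : Nat, 0 < j → j < m.length → (j - 1) / 2 = p → x ≤ m.getD j 0) →
    IsHeap (pySiftdownFuel fuel m 0 p x) := by
  induction fuel with
  | zero =>
    intro m p x hf hp H1 HB HC
    have hp0 : p = 0 := by omega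
    subst hp0
    rw [pySiftdownFuel]
    intro j hj hjl
    simp only [List.length_set] at hjl
    have g : ∀ k : Nat, (m.set 0 x).getD k 0 = if k = 0 then x else m.getD k 0 :=
      fun k => getD_set' m 0 k x hp
    rw [g, g, if_neg (by omega : j ≠ 0)]
    by_cases hcp : (j - 1) / 2 = 0
    · rw [if_pos hcp]; exact HC j hj hjl hcp
    · rw [if_neg hcp]; exact H1 j hj hjl hcp (by omega)
  | succ fuel ih =>
    intro m p x hf hp H1 HB HC
    rw [pySiftdownFuel]
    split
    · next hcnd =>
      obtain ⟨h0p, hlt⟩ := hcnd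
      have hpp : (p - 1) / 2 < m.length := by omega
      have g : ∀ j : Nat, (m.set p (m.getD ((p - 1) / 2) 0)).getD j 0 =
          if j = p then m.getD ((p - 1) / 2) 0 else m.getD j 0 :=
        fun j => getD_set' m p j _ hp
      apply ih _ _ x (by omega) (by simpa using hpp)
      · -- H1'
        intro j hj hjl hne hnp
        simp only [List.length_set] at hjl
        rw [g, g]
        by_cases hjp : j = p
        · exact absurd (by omega : (j - 1) / 2 = (p - 1) / 2)
            (by rw [hjp] at hne ⊢; omega)
        · rw [if_neg hjp]
          by_cases hcp : (j - 1) / 2 = p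
          · rw [if_pos hcp]
            exact HB h0p j hj hjl hcp
          · rw [if_neg hcp]
            exact H1 j hj hjl hcp hjp
      · -- HB'
        intro hpp0 j hj hjl hcpp
        simp only [List.length_set] at hjl
        have hne1 : ((p - 1) / 2 - 1) / 2 ≠ p := by omega
        rw [g, g, if_neg hne1]
        have hstep : m.getD (((p - 1) / 2 - 1) / 2) 0 ≤ m.getD ((p - 1) / 2) 0 :=
          H1 ((p - 1) / 2) hpp0 hpp (by omega) (by omega)
        by_cases hjp : j = p
        · rw [if_pos hjp]; exact hstep
        · rw [if_neg hjp]
          have h1 := H1 j hj hjl (by omega) hjp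
          rw [hcpp] at h1
          exact hstep.trans h1
      · -- HC'
        intro j hj hjl hcpp
        simp only [List.length_set] at hjl
        rw [g]
        by_cases hjp : j = p
        · rw [if_pos hjp]; exact le_of_lt hlt
        · rw [if_neg hjp]
          have h1 := H1 j hj hjl (by omega) hjp
          rw [hcpp] at h1
          exact le_of_lt (lt_of_lt_of_le hlt h1)
    · next hcnd =>
      intro j hj hjl
      simp only [List.length_set] at hjl
      have g : ∀ k : Nat, (m.set p x).getD k 0 = if k = p then x else m.getD k 0 :=
        fun k => getD_set' m p k x hp
      rw [g, g]
      by_cases hjp : j = p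
      · rw [if_pos hjp, if_neg (by omega : (j - 1) / 2 ≠ p)]
        subst hjp
        rcases Decidable.not_and_iff_not_or_not.mp hcnd with h0 | hxe
        · omega
        · exact not_lt.mp hxe
      · rw [if_neg hjp]
        by_cases hcp : (j - 1) / 2 = p
        · rw [if_pos hcp]; exact HC j hj hjl hcp
        · rw [if_neg hcp]; exact H1 j hj hjl hcp hjp

theorem pySiftdown_perm (m : List Int) (s p : Nat) (x : Int) (hp : p < m.length) :
    (pySiftdown m s p x).Perm (m.set p x) :=
  siftdownF_perm p m s p x (le_refl p) hp

theorem pySiftdown_heap (m : List Int) (p : Nat) (x : Int) (hp : p < m.length)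
    (H1 : ∀ j : Nat, 0 < j → j < m.length → (j - 1) / 2 ≠ p → j ≠ p →
      m.getD ((j - 1) / 2) 0 ≤ m.getD j 0)
    (HB : 0 < p → ∀ j : Nat, 0 < j → j < m.length → (j - 1) / 2 = p →
      m.getD ((p - 1) / 2) 0 ≤ m.getD j 0)
    (HC : ∀ j : Nat, 0 < j → j < m.length → (j - 1) / 2 = p → x ≤ m.getD j 0) :
    IsHeap (pySiftdown m 0 p x) :=
  siftdownF_heap p m p x (le_refl p) hp H1 HB HC

theorem pyChild_spec (m : List Int) (p e : Nat) (he : 2 * p + 1 < e) :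
    (2 * p + 1 ≤ pyChild m p e ∧ pyChild m p e ≤ 2 * p + 2 ∧ pyChild m p e < e) ∧
    (∀ q : Nat, 0 < q → (q - 1) / 2 = p → q < e → q ≠ pyChild m p e →
      m.getD (pyChild m p e) 0 ≤ m.getD q 0) := by
  constructor
  · unfold pyChild; split <;> omega
  · intro q hq0 hq hql hqc
    have hq' : q = 2 * p + 1 ∨ q = 2 * p + 2 := by omega
    unfold pyChild at hqc ⊢
    split
    · next hcnd =>
      rw [if_pos hcnd] at hqc
      have hqv : q = 2 * p + 1 := by omega
      rw [hqv]
      exact not_lt.mp hcnd.2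
    · next hcnd =>
      rw [if_neg hcnd] at hqc
      have hqv : q = 2 * p + 2 := by omega
      have h2e : 2 * p + 2 < e := by omega
      have hlt : m.getD (2 * p + 1) 0 < m.getD (2 * p + 2) 0 := by
        by_contra hcon; exact hcnd ⟨h2e, hcon⟩
      rw [hqv]
      exact le_of_lt hlt

theorem siftupF_perm (fuel : Nat) : ∀ (m : List Int) (p : Nat) (x : Int) (e : Nat),
    e = m.length → p < e → (pySiftupFuel fuel m p x e).Perm (m.set p x) := by
  induction fuel with
  | zero =>
    intro m p x e he hp
    rw [pySiftupFuel]
    exact pySiftdown_perm m 0 p x (he ▸ hp)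
  | succ fuel ih =>
    intro m p x e he hp
    rw [pySiftupFuel]
    split
    · next hcnd =>
      obtain ⟨⟨hc1, _, hc3⟩, _⟩ := pyChild_spec m p e hcnd
      have hcl : pyChild m p e < m.length := he ▸ hc3
      have hpl : p < m.length := he ▸ hp
      refine (ih _ _ x e (by simpa using he) hc3).trans ?_
      exact set_set_perm m p (pyChild m p e) x hpl hcl (by omega)
    · exact pySiftdown_perm m 0 p x (he ▸ hp)

theorem siftupF_heap (fuel : Nat) : ∀ (m : List Int) (p : Nat) (x : Int) (e : Nat),
    e - p ≤ fuel → e = m.length → p < e →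
    (∀ j : Nat, 0 < j → j < m.length → (j - 1) / 2 ≠ p → j ≠ p →
      m.getD ((j - 1) / 2) 0 ≤ m.getD j 0) →
    (0 < p → ∀ j : Nat, 0 < j → j < m.length → (j - 1) / 2 = p →
      m.getD ((p - 1) / 2) 0 ≤ m.getD j 0) →
    IsHeap (pySiftupFuel fuel m p x e) := by
  induction fuel with
  | zero =>
    intro m p x e hf he hp H1 HB
    exact absurd hp (by omega)
  | succ fuel ih =>
    intro m p x e hf he hp H1 HB
    rw [pySiftupFuel]
    split
    · next hcnd =>
      obtain ⟨⟨hc1, hc2, hc3⟩, hcmin⟩ := pyChild_spec m p e hcnd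
      have hcl : pyChild m p e < m.length := he ▸ hc3
      have hpl : p < m.length := he ▸ hp
      have g : ∀ k : Nat, (m.set p (m.getD (pyChild m p e) 0)).getD k 0 =
          if k = p then m.getD (pyChild m p e) 0 else m.getD k 0 :=
        fun k => getD_set' m p k _ hpl
      apply ih _ _ x e (by omega) (by simpa using he) hc3
      · -- H1'
        intro j hj hjl hne hnc
        simp only [List.length_set] at hjl
        rw [g, g]
        by_cases hjp : j = p
        · rw [if_pos hjp, if_neg (by omega : (j - 1) / 2 ≠ p)]
          have hb := HB (by omega) (pyChild m p e) (by omega) hcl (by omega)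
          rw [hjp]
          exact hb
        · rw [if_neg hjp]
          by_cases hcp : (j - 1) / 2 = p
          · rw [if_pos hcp]
            exact hcmin j hj hcp (by omega) hnc
          · rw [if_neg hcp]
            exact H1 j hj hjl hcp hjp
      · -- HB'
        intro hc0 j hj hjl hcc
        simp only [List.length_set] at hjl
        have hcp : (pyChild m p e - 1) / 2 = p := by omega
        rw [g, g, hcp, if_pos rfl, if_neg (by omega : j ≠ p)]
        have h1 := H1 j hj hjl (by omega) (by omega)
        rw [hcc] at h1
        exact h1
    · next hcnd =>
      apply pySiftdown_heap m p x (he ▸ hp) H1 HB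
      intro j hj hjl hcp
      exact absurd hjl (by omega)

theorem getD_dropLast (l : List Int) (k : Nat) (hk : k < l.dropLast.length) :
    l.dropLast.getD k 0 = l.getD k 0 := by
  have h2 : k < l.length := by simp only [List.length_dropLast] at hk; omega
  rw [List.getD_eq_getElem l.dropLast 0 hk, List.getD_eq_getElem l 0 h2,
    List.getElem_dropLast]

theorem pyHeappush_perm (hp : List Int) (x : Int) : (pyHeappush hp x).Perm (x :: hp) := by
  unfold pyHeappush
  have h1 := pySiftdown_perm (hp ++ [x]) 0 hp.length x (by simp)
  have h2 : (hp ++ [x]).set hp.length x = hp ++ [x] := by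
    rw [List.set_append_right _ _ (le_refl _)]
    simp
  rw [h2] at h1
  exact h1.trans (List.perm_append_singleton x hp)

theorem pyHeappush_heap (hp : List Int) (x : Int) (hh : IsHeap hp) :
    IsHeap (pyHeappush hp x) := by
  unfold pyHeappush
  apply pySiftdown_heap (hp ++ [x]) hp.length x (by simp)
  · intro j hj hjl hne hnp
    simp only [List.length_append, List.length_singleton] at hjl
    have hjn : j < hp.length := by omega
    rw [List.getD_append _ _ _ _ (by omega), List.getD_append _ _ _ _ (by omega)]
    exact hh j hj hjn
  · intro h0 j hj hjl hcp
    simp only [List.length_append, List.length_singleton] at hjl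
    omega
  · intro j hj hjl hcp
    simp only [List.length_append, List.length_singleton] at hjl
    omega

theorem root_min (m : List Int) (hh : IsHeap m) :
    ∀ j : Nat, j < m.length → m.getD 0 0 ≤ m.getD j 0 := by
  intro j
  induction j using Nat.strong_induction_on with
  | _ j ih =>
    intro hj
    rcases Nat.eq_zero_or_pos j with h0 | h0
    · subst h0; exact le_refl _
    · exact (ih ((j - 1) / 2) (by omega) (by omega)).trans (hh j h0 hj)

theorem pyHeappop_fst (hp : List Int) (h : hp ≠ []) : (pyHeappop hp).1 = hp.getD 0 0 := by
  match hp with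
  | [a] => simp [pyHeappop]
  | a :: b :: t =>
    have hne : (a :: b :: t).dropLast ≠ [] := by simp
    simp only [pyHeappop, List.isEmpty_iff, if_neg hne]
    rw [getD_dropLast _ 0 (by simp)]

theorem pyHeappop_perm (hp : List Int) (h : hp ≠ []) :
    (hp.getD 0 0 :: (pyHeappop hp).2).Perm hp := by
  match hp with
  | [a] => simp [pyHeappop]
  | a :: b :: t =>
    set l : List Int := a :: b :: t with hl
    have hne : l.dropLast ≠ [] := by simp [hl]
    have hrl : 0 < l.dropLast.length := List.length_pos_iff.mpr hne
    simp only [pyHeappop, List.isEmpty_iff, if_neg hne]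
    have hperm := siftupF_perm l.dropLast.length (l.dropLast.set 0 (l.getLastD 0)) 0
      (l.getLastD 0) l.dropLast.length (by simp) (by simpa using hrl)
    rw [List.set_set] at hperm
    have hg0 : l.getD 0 0 = l.dropLast.getD 0 0 := (getD_dropLast l 0 hrl).symm
    rw [hg0]
    refine (List.Perm.cons _ hperm).trans ?_
    refine ((getD_cons_set_perm l.dropLast 0 (l.getLastD 0) hrl).trans ?_)
    have hsplit : l.dropLast ++ [l.getLastD 0] = l := by
      have h1 : l.getLastD 0 = l.getLast (by simp [hl]) := by
        rw [List.getLastD_eq_getLast?, List.getLast?_eq_some_getLast (by simp [hl])]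
        rfl
      rw [h1, List.dropLast_append_getLast]
    have h2 : (l.getLastD 0 :: l.dropLast).Perm (l.dropLast ++ [l.getLastD 0]) :=
      (List.perm_append_singleton _ _).symm
    rw [hsplit] at h2
    exact h2

theorem pyHeappop_heap (hp : List Int) (hh : IsHeap hp) : IsHeap (pyHeappop hp).2 := by
  by_cases hne : hp.dropLast.isEmpty
  · simp only [pyHeappop, if_pos hne]
    intro j hj hjl
    rw [List.isEmpty_iff] at hne
    rw [hne] at hjl
    simp at hjl
  · simp only [pyHeappop, if_neg hne]
    rw [List.isEmpty_iff] at hne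
    have hrl : 0 < hp.dropLast.length := List.length_pos_iff.mpr hne
    apply siftupF_heap _ _ 0 _ _ (by omega) (by simp) (by simpa using hrl)
    · intro j hj hjl hne2 hnp
      simp only [List.length_set] at hjl
      rw [getD_set' _ 0 _ _ hrl, getD_set' _ 0 _ _ hrl, if_neg hne2, if_neg hnp,
        getD_dropLast _ _ (by omega), getD_dropLast _ _ hjl]
      have hjh : j < hp.length := by simp only [List.length_dropLast] at hjl; omega
      exact hh j hj hjh
    · intro h0
      exact absurd h0 (lt_irrefl 0)

theorem bInsert_perm (s : Int) (l : List Int) : (bInsert s l).Perm (s :: l) := by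
  induction l with
  | nil => simp [bInsert]
  | cons b t ih =>
    rw [bInsert]
    split
    · exact (ih.cons b).trans (List.Perm.swap s b t)
    · exact List.Perm.refl _

theorem bInsert_sorted (s : Int) (l : List Int) (hl : l.Pairwise (· ≤ ·)) :
    (bInsert s l).Pairwise (· ≤ ·) := by
  induction l with
  | nil => simp [bInsert]
  | cons b t ih =>
    obtain ⟨hb, ht⟩ := List.pairwise_cons.mp hl
    rw [bInsert]
    split
    · next hbs =>
      refine List.pairwise_cons.mpr ⟨?_, ih ht⟩
      intro y hy
      rcases List.mem_cons.mp ((bInsert_perm s t).mem_iff.mp hy) with h | h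
      · subst h; exact le_of_lt hbs
      · exact hb y h
    · next hbs =>
      refine List.pairwise_cons.mpr ⟨?_, hl⟩
      intro y hy
      rcases List.mem_cons.mp hy with h | h
      · rw [h]; exact not_lt.mp hbs
      · exact (not_lt.mp hbs).trans (hb y h)

theorem heap_root_eq (hp : List Int) (a : Int) (t : List Int)
    (hheap : IsHeap hp) (hsort : (a :: t).Pairwise (· ≤ ·))
    (hperm : hp.Perm (a :: t)) : hp.getD 0 0 = a := by
  have hlen : 0 < hp.length := by
    have := hperm.length_eq; simp at this; omega
  have hroot_mem : hp.getD 0 0 ∈ hp := by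
    rw [List.getD_eq_getElem hp 0 hlen]; exact List.getElem_mem _
  have h1 : a ≤ hp.getD 0 0 := by
    rcases List.mem_cons.mp (hperm.mem_iff.mp hroot_mem) with h | h
    · omega
    · exact (List.pairwise_cons.mp hsort).1 _ h
  have h2 : hp.getD 0 0 ≤ a := by
    have ha : a ∈ hp := hperm.mem_iff.mpr (List.mem_cons_self)
    obtain ⟨k, hk, hka⟩ := List.mem_iff_getElem.mp ha
    have := root_min hp hheap k hk
    rw [List.getD_eq_getElem hp 0 hk, hka] at this
    exact this
  omega

theorem loop_eq (fuel : Nat) : ∀ (hp pool : List Int), hp.length ≤ fuel → IsHeap hp →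
    pool.Pairwise (· ≤ ·) → hp.Perm pool → pyMergeFuel fuel hp = bLoopFuel fuel pool := by
  induction fuel with
  | zero => intro hp pool _ _ _ _; rw [pyMergeFuel, bLoopFuel]
  | succ fuel ih =>
    intro hp pool hlen hheap hsort hperm
    have hplen : pool.length = hp.length := hperm.length_eq.symm
    rw [pyMergeFuel]
    by_cases hn : 1 < hp.length
    · rw [if_pos hn]
      match pool, hplen with
      | a :: b :: rest, hplen =>
        have hne : hp ≠ [] := by
          intro h; rw [h] at hn; simp at hn
        have hroot := heap_root_eq hp a (b :: rest) hheap hsort hperm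
        have hv1 : (pyHeappop hp).1 = a := by rw [pyHeappop_fst hp hne, hroot]
        have hperm1 : (pyHeappop hp).2.Perm (b :: rest) := by
          have h := pyHeappop_perm hp hne
          rw [hroot] at h
          exact (h.trans hperm).cons_inv
        have hheap1 := pyHeappop_heap hp hheap
        have hlen1 : (pyHeappop hp).2.length = hp.length - 1 := length_pyHeappop_snd hp
        have hne1 : (pyHeappop hp).2 ≠ [] := by
          intro h; rw [h] at hlen1; simp at hlen1; omega
        have hsort1 : (b :: rest).Pairwise (· ≤ ·) := hsort.of_cons
        have hroot1 := heap_root_eq _ b rest hheap1 hsort1 hperm1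
        have hv2 : (pyHeappop (pyHeappop hp).2).1 = b := by
          rw [pyHeappop_fst _ hne1, hroot1]
        have hperm2 : (pyHeappop (pyHeappop hp).2).2.Perm rest := by
          have h := pyHeappop_perm _ hne1
          rw [hroot1] at h
          exact (h.trans hperm1).cons_inv
        have hheap2 := pyHeappop_heap _ hheap1
        have hperm3 : (pyHeappush (pyHeappop (pyHeappop hp).2).2 (a + b)).Perm
            (bInsert (a + b) rest) :=
          ((pyHeappush_perm _ _).trans (hperm2.cons _)).trans (bInsert_perm _ _).symm
        have hheap3 := pyHeappush_heap _ (a + b) hheap2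
        have hsort3 := bInsert_sorted (a + b) rest hsort1.of_cons
        have hlen3 : (pyHeappush (pyHeappop (pyHeappop hp).2).2 (a + b)).length ≤ fuel := by
          rw [length_pyHeappush, length_pyHeappop_snd, hlen1]
          omega
        have hrec := ih _ _ hlen3 hheap3 hsort3 hperm3
        rw [hv1, hv2, hrec, bLoopFuel]
      | [], hplen => simp at hplen; omega
      | [a], hplen => simp at hplen; omega
    · rw [if_neg hn]
      match pool, hplen with
      | [], _ =>
        rw [bLoopFuel]
        all_goals intro _ _ _ h2; simp at h2
      | [a], _ =>
        rw [bLoopFuel]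
        all_goals intro _ _ _ h2; simp at h2
      | a :: b :: rest, hplen => simp at hplen; omega

theorem foldl_push_perm (l : List Int) (h0 : List Int) :
    (l.foldl pyHeappush h0).Perm (h0 ++ l) := by
  induction l generalizing h0 with
  | nil => simp
  | cons v t ih =>
    simp only [List.foldl_cons]
    refine (ih (pyHeappush h0 v)).trans ?_
    refine (((pyHeappush_perm h0 v).append_right t).trans ?_)
    exact List.perm_middle.symm

theorem foldl_push_heap (l : List Int) (h0 : List Int) (hh : IsHeap h0) :
    IsHeap (l.foldl pyHeappush h0) := by
  induction l generalizing h0 with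
  | nil => exact hh
  | cons v t ih => exact ih _ (pyHeappush_heap h0 v hh)

theorem emptyHeap : IsHeap [] := by
  intro j hj hjl
  simp at hjl

-- ===== VERDICT (by name: the statement is the Claim_ definition above) =====
theorem optimal_merge_pattern_spec : Claim_equal_optimal_merge_pattern := by
  intro arr size hdom hpre
  unfold Spec_optimal_merge_pattern optimal_merge_pattern optimal_merge_pattern_alt
  have hfold : (PySem.List.pyRange 0 size 1).foldl
      (fun h i => pyHeappush h (PySem.List.pyGetD arr i 0)) [] =
      ((PySem.List.pyRange 0 size 1).map (fun i => PySem.List.pyGetD arr i 0)).foldl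
        pyHeappush [] := by
    rw [List.foldl_map]
  rw [hfold]
  set l := (PySem.List.pyRange 0 size 1).map (fun i => PySem.List.pyGetD arr i 0) with hl
  set srt := PySem.List.sorted l (fun x => x) false with hsrt
  have hsp : srt.Perm l := PySem.List.sorted_perm l (fun x => x) false
  have hpair : srt.Pairwise (· ≤ ·) := by
    have h := PySem.List.sorted_pairwise l (fun x => x)
    simpa using h
  have hlen : (l.foldl pyHeappush []).length = srt.length := by
    rw [hsp.length_eq]
    simpa using (foldl_push_perm l []).length_eq
  rw [pyMergeLoop, bLoop, ← hlen]
  apply loop_eq _ _ _ (le_refl _)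
  · exact foldl_push_heap l [] emptyHeap
  · exact hpair
  · exact ((foldl_push_perm l []).trans (by simp)).trans hsp.symm
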